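-- pv_equiv track=rewrite | github.com/MatiasBS027/TEC | I SEMESTRE/Introduccion a la Programacion/IntroTallerTrabajos/paridadNumero.py | determinarParidad
-- ===== SOURCE A (Python) =====
-- def esPar(pnum):
--     if pnum %2 ==0:
--         return True
--     else:
--         return False
--
-- def determinarParidad(pn1,pn2):
--     contador=1
--     while contador!=pn1:
--         pn2//=10
--         contador+=1
--     if esPar(pn2) == True:
--         return True
--     else:
--         return False
-- ===== SOURCE B (Python) =====
-- def determinarParidad(pn1, pn2):
--     # closed form: A's loop divides pn2 by 10 exactly pn1-1 times
--     return (pn2 // 10 ** (pn1 - 1)) % 2 == 0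
-- ===== Notes on version B (the rewrite author's own statement) =====
-- stated objective: simpler
-- what changed: Replaces the counter-driven while loop of repeated //=10 steps (and the esPar helper) with the single closed-form expression (pn2 // 10**(pn1-1)) % 2 == 0.
import Mathlib
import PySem

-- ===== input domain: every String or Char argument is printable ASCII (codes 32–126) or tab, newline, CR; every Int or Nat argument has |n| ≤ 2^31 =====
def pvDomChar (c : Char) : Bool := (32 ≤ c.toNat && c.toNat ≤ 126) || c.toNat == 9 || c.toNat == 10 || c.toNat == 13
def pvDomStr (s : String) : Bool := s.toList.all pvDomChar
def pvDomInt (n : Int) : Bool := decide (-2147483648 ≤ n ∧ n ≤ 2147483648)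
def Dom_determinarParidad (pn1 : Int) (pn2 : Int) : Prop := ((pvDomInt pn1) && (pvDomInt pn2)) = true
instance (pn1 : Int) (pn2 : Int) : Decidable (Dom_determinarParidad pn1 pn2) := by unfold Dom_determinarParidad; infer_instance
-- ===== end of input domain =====

-- B inlines the parity helper and replaces A's counter-driven while loop with the
-- closed form (pn2 // 10**(pn1-1)) % 2 == 0 (simpler: one expression instead of a loop).


-- ===== PORT A =====
-- helper esPar(pnum): pnum % 2 == 0
def esPar (pnum : Int) : Bool := decide (PySem.Int.mod pnum 2 = 0)

-- the while loop runs while contador != pn1, i.e. (given Pre_: 1 ≤ pn1) exactly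
-- (pn1 - 1).toNat times; each step does pn2 //= 10
def detParLoop (fuel : Nat) (pn2 : Int) : Int :=
  match fuel with
  | 0 => pn2
  | f + 1 => detParLoop f (PySem.Int.floordiv pn2 10)

def determinarParidad (pn1 : Int) (pn2 : Int) : Bool :=
  let r := detParLoop (pn1 - 1).toNat pn2
  if esPar r = true then true else false

-- ===== PORT B =====
-- for pn1 < 1 Python's 10 ** (pn1 - 1) is a float, outside the Int convention; that
-- region lies outside Pre_ and the port totalizes it with false
def determinarParidad_alt (pn1 : Int) (pn2 : Int) : Bool :=
  if pn1 - 1 < 0 then false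
  else decide (PySem.Int.mod (PySem.Int.floordiv pn2 ((10 : Int) ^ (pn1 - 1).toNat)) 2 = 0)

-- ===== PRECONDITION & SPEC =====
-- Pre_ excludes pn1 < 1, on which A's while loop never terminates (contador starts at 1
-- and only grows), so A returns no value there.
def Pre_determinarParidad (pn1 : Int) (pn2 : Int) : Prop := 1 ≤ pn1
instance (pn1 : Int) (pn2 : Int) : Decidable (Pre_determinarParidad pn1 pn2) := by unfold Pre_determinarParidad; infer_instance
def pvWitness_determinarParidad : Int × Int := (3, 4712)

def Spec_determinarParidad (pn1 : Int) (pn2 : Int) (out : Bool) : Prop := out = determinarParidad_alt pn1 pn2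
instance (pn1 : Int) (pn2 : Int) (out : Bool) : Decidable (Spec_determinarParidad pn1 pn2 out) := by unfold Spec_determinarParidad; infer_instance

-- ===== CLAIM (what is proved, stated in full; the proofs are below) =====
def Claim_equal_determinarParidad : Prop := ∀ (pn1 : Int) (pn2 : Int), Dom_determinarParidad pn1 pn2 → Pre_determinarParidad pn1 pn2 → Spec_determinarParidad pn1 pn2 (determinarParidad pn1 pn2)

-- ===== LEMMAS AND PROOFS =====
-- repeated floor division by 10 is floor division by 10^k
lemma detParLoop_eq (k : Nat) (n : Int) :
    detParLoop k n = PySem.Int.floordiv n ((10 : Int) ^ k) := by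
  induction k generalizing n with
  | zero =>
    rw [detParLoop, pow_zero, PySem.Int.floordiv_eq_ediv_of_pos (by norm_num : (0:Int) < 1), Int.ediv_one]
  | succ f ih =>
    rw [detParLoop, ih]
    rw [PySem.Int.floordiv_eq_ediv_of_pos (by norm_num : (0:Int) < 10),
        PySem.Int.floordiv_eq_ediv_of_pos (by positivity),
        PySem.Int.floordiv_eq_ediv_of_pos (by positivity)]
    rw [pow_succ, mul_comm, Int.ediv_ediv_of_nonneg (by norm_num)]

-- ===== VERDICT (by name: the statement is the Claim_ definition above) =====
theorem determinarParidad_spec : Claim_equal_determinarParidad := by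
  intro pn1 pn2 _ hpre
  unfold Spec_determinarParidad determinarParidad determinarParidad_alt esPar
  have h1 : ¬ pn1 - 1 < 0 := by unfold Pre_determinarParidad at hpre; omega
  rw [detParLoop_eq, if_neg h1]
  simp
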